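-- pv_equiv track=rewrite | github.com/Developer-Taher/Mastering-Python | 6_strings.py | clean_phone_number
-- ===== SOURCE A (Python) =====
-- def clean_phone_number(phone):
--     """Clean and format phone number"""
--     # Remove all non-digit characters
--     digits_only = ''.join(char for char in phone if char.isdigit())
--
--     if len(digits_only) == 10:
--         # Format as (XXX) XXX-XXXX
--         return f"({digits_only[:3]}) {digits_only[3:6]}-{digits_only[6:]}"
--     elif len(digits_only) == 11 and digits_only.startswith('1'):
--         # Remove leading 1 and format
--         return f"({digits_only[1:4]}) {digits_only[4:7]}-{digits_only[7:]}"
--     else: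
--         return "Invalid phone number"
-- ===== SOURCE B (Python) =====
-- def clean_phone_number(phone):
--     """Clean and format phone number"""
--     digits = [c for c in phone if c.isdigit()]
--     # normalize: drop the leading country code '1' of an 11-digit number
--     if len(digits) == 11 and digits[0] == '1':
--         digits = digits[1:]
--     if len(digits) != 10:
--         return "Invalid phone number"
--     # single pass: emit separators at the right positions
--     out = []
--     for i, c in enumerate(digits):
--         if i == 0:
--             out.append('(')
--         elif i == 3:
--             out.append(') ')
--         elif i == 6:
--             out.append('-')
--         out.append(c)
--     return ''.join(out)
-- ===== Notes on version B (the rewrite author's own statement) =====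
-- stated objective: simpler
-- what changed: Normalizes an 11-digit '1'-prefixed number first so only one length test remains, then builds the formatted string in a single enumerate pass that emits separators by position instead of slicing in two separate format branches.
import Mathlib
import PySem

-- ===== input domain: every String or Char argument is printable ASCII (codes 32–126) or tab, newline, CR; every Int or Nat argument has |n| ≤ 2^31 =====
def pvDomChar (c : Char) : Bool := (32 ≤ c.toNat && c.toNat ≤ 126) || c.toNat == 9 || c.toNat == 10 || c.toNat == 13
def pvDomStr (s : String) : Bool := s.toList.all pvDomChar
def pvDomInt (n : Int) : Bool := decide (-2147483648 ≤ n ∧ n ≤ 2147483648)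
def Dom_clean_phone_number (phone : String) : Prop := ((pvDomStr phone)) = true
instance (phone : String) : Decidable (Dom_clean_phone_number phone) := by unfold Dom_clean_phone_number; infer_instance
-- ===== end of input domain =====

-- B normalizes the optional leading '1' first and formats in one enumerate pass with
-- position-based separators, instead of A's two length-branches with slicing (objective: simpler).


-- ===== PORT A =====
-- ''.join(char for char in phone if char.isdigit()); slices ported as take/drop on the char list
def clean_phone_number (phone : String) : String :=
  let d := phone.toList.filter (fun c => PySem.Chars.isdigit c)
  if d.length = 10 then
    String.ofList (['('] ++ d.take 3 ++ [')', ' '] ++ ((d.drop 3).take 3) ++ ['-'] ++ d.drop 6)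
  else if d.length = 11 ∧ d.head? = some '1' then
    let e := d.drop 1
    String.ofList (['('] ++ e.take 3 ++ [')', ' '] ++ ((e.drop 3).take 3) ++ ['-'] ++ e.drop 6)
  else
    "Invalid phone number"

-- ===== PORT B =====
def clean_phone_number_alt (phone : String) : String :=
  let digits := phone.toList.filter (fun c => PySem.Chars.isdigit c)
  let digits := if digits.length = 11 ∧ digits.head? = some '1' then digits.drop 1 else digits
  if digits.length ≠ 10 then "Invalid phone number"
  else
    String.ofList ((PySem.List.enumerate digits).foldl
      (fun acc (p : Int × Char) =>
        acc ++ (if p.1 = 0 then ['('] else if p.1 = 3 then [')', ' '] else if p.1 = 6 then ['-'] else []) ++ [p.2])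
      [])

-- ===== PRECONDITION & SPEC =====
def Spec_clean_phone_number (phone : String) (out : String) : Prop := out = clean_phone_number_alt phone
instance (phone : String) (out : String) : Decidable (Spec_clean_phone_number phone out) := by unfold Spec_clean_phone_number; infer_instance

-- ===== CLAIM (what is proved, stated in full; the proofs are below) =====
def Claim_equal_clean_phone_number : Prop := ∀ (phone : String), Dom_clean_phone_number phone → Spec_clean_phone_number phone (clean_phone_number phone)

-- ===== LEMMAS AND PROOFS =====

-- the single-pass builder, on a list of exactly 10 chars, produces A's sliced format
theorem fold_format_ten (d : List Char) (h : d.length = 10) :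
    (PySem.List.enumerate d).foldl
      (fun acc (p : Int × Char) =>
        acc ++ (if p.1 = 0 then ['('] else if p.1 = 3 then [')', ' '] else if p.1 = 6 then ['-'] else []) ++ [p.2])
      []
    = ['('] ++ d.take 3 ++ [')', ' '] ++ ((d.drop 3).take 3) ++ ['-'] ++ d.drop 6 := by
  match d, h with
  | [a,b,c,e,f,g,i,j,k,l], _ =>
    simp [PySem.List.enumerate, List.foldl]

theorem clean_eq (phone : String) : clean_phone_number phone = clean_phone_number_alt phone := by
  simp only [clean_phone_number, clean_phone_number_alt]
  set d := phone.toList.filter (fun c => PySem.Chars.isdigit c) with hd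
  by_cases h11 : d.length = 11 ∧ d.head? = some '1'
  · have h10 : ¬ d.length = 10 := by omega
    have hlen : (d.drop 1).length = 10 := by simp [h11.1]
    rw [if_neg h10, if_pos h11, if_pos h11, if_neg (by simp [h11.1]),
        fold_format_ten _ hlen]
  · by_cases h10 : d.length = 10
    · rw [if_pos h10, if_neg h11, if_neg (by simp [h10]),
        fold_format_ten _ h10]
    · rw [if_neg h10, if_neg h11, if_neg h11, if_pos h10]

-- ===== VERDICT (by name: the statement is the Claim_ definition above) =====
theorem clean_phone_number_spec : Claim_equal_clean_phone_number := by
  intro phone _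
  unfold Spec_clean_phone_number
  exact clean_eq phone
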